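-- pv_equiv track=rewrite | github.com/queelius/computational-explorations | src/lower_bound_techniques.py | coprime_cliques
-- ===== SOURCE A (Python) =====
-- import math
-- from typing import Dict, List, Optional, Set, Tuple
--
-- def coprime_adj(n: int) -> Dict[int, Set[int]]:
--     """Adjacency dict for the coprime graph on [n]."""
--     adj: Dict[int, Set[int]] = {v: set() for v in range(1, n + 1)}
--     for i in range(1, n + 1):
--         for j in range(i + 1, n + 1):
--             if math.gcd(i, j) == 1:
--                 adj[i].add(j)
--                 adj[j].add(i)
--     return adj
--
-- def coprime_cliques(n: int, k: int) -> List[Tuple[int, ...]]: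
--     """Enumerate all k-cliques in the coprime graph on [n]."""
--     if k < 1:
--         return []
--     if k == 1:
--         return [(v,) for v in range(1, n + 1)]
--     adj = coprime_adj(n)
--     vertices = list(range(1, n + 1))
--     cliques: List[Tuple[int, ...]] = []
--
--     def extend(current: List[int], candidates: List[int]):
--         if len(current) == k:
--             cliques.append(tuple(current))
--             return
--         needed = k - len(current)
--         for idx, v in enumerate(candidates):
--             if len(candidates) - idx < needed:
--                 break
--             if all(v in adj[u] for u in current):
--                 new_cands = [w for w in candidates[idx + 1:] if w in adj[v]]
--                 extend(current + [v], new_cands)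
--
--     extend([], vertices)
--     return cliques
-- ===== SOURCE B (Python) =====
-- import math
--
--
-- def _combos(xs, r):
--     """All r-element combinations of xs, in lexicographic (index) order."""
--     if r == 0:
--         return [[]]
--     if len(xs) < r:
--         return []
--     rest = xs[1:]
--     return [[xs[0]] + c for c in _combos(rest, r - 1)] + _combos(rest, r)
--
--
-- def _pairwise_coprime(c):
--     if not c:
--         return True
--     return all(math.gcd(c[0], w) == 1 for w in c[1:]) and _pairwise_coprime(c[1:])
--
--
-- def coprime_cliques(n, k):
--     """Enumerate all k-cliques in the coprime graph on [n]."""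
--     if k < 1:
--         return []
--     return [tuple(c) for c in _combos(list(range(1, n + 1)), k)
--             if _pairwise_coprime(c)]
-- ===== Notes on version B (the rewrite author's own statement) =====
-- stated objective: simpler
-- what changed: Replaces the adjacency-dict plus pruned recursive DFS with a plain generate-all-k-combinations of [1..n] followed by a pairwise-gcd filter; combinations come out in the same lexicographic order as A's DFS emission.
import Mathlib
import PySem

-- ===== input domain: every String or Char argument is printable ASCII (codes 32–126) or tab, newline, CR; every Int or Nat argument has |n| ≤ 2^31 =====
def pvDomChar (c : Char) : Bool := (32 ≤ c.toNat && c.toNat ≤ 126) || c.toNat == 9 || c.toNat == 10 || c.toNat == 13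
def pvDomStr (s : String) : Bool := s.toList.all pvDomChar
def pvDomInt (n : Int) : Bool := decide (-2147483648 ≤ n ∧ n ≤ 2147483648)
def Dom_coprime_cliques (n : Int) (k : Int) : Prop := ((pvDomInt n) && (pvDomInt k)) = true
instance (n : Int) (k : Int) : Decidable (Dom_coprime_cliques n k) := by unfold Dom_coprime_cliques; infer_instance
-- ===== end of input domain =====

-- B replaces A's adjacency-dict pruned DFS by generate-all-k-combinations plus a pairwise-gcd
-- filter (objective: simpler; not faster).

-- ===== PORT A =====
-- coprime_adj: dict comprehension of empty sets, then the double range loop adding both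
-- directions when gcd(i,j) == 1 (adj[i].add(j) is Dict.modify at an existing key).
def coprime_adj (n : Int) : PySem.Dict Int (PySem.Set Int) :=
  let adj : PySem.Dict Int (PySem.Set Int) :=
    (PySem.List.pyRange 1 (n+1)).foldl (fun d v => d.insert v PySem.Set.empty) PySem.Dict.empty
  (PySem.List.pyRange 1 (n+1)).foldl (fun d i =>
    (PySem.List.pyRange (i+1) (n+1)).foldl (fun d j =>
      if Int.gcd i j = 1 then
        (d.modify i PySem.Set.empty (fun s => PySem.Set.add s j)).modify j PySem.Set.empty
          (fun s => PySem.Set.add s i)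
      else d) d) adj

-- extend's for-loop over enumerate(candidates) is goA over the remaining suffix:
-- 'len(candidates) - idx', the number of not-yet-visited candidates including v, is
-- rest.length + 1; the 'break' returns [] since every later iteration also breaks.
-- 'v in adj[u]' is getD with an empty-set default: extend only looks up keys in 1..n,
-- which coprime_adj always contains, so no KeyError is reachable.
mutual
def extendA (k : Int) (adj : PySem.Dict Int (PySem.Set Int)) (current : List Int)
    (cands : List Int) : List (List Int) :=
  if (current.length : Int) = k then [current]
  else goA k adj current cands
termination_by 2 * cands.length + 1

def goA (k : Int) (adj : PySem.Dict Int (PySem.Set Int)) (current : List Int) :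
    List Int → List (List Int)
  | [] => []
  | v :: rest =>
    if ((rest.length : Int) + 1) < k - (current.length : Int) then []
    else
      (if current.all (fun u => PySem.Set.contains (adj.getD u PySem.Set.empty) v) then
        extendA k adj (current ++ [v])
          (rest.filter (fun w => PySem.Set.contains (adj.getD v PySem.Set.empty) w))
      else []) ++ goA k adj current rest
termination_by l => 2 * l.length
decreasing_by
  all_goals simp
  all_goals (have := List.length_filter_le (fun w => decide (w ∈ adj.getD v [])) rest; omega)
end

def coprime_cliques (n : Int) (k : Int) : List (List Int) :=
  if k < 1 then []
  else if k = 1 then (PySem.List.pyRange 1 (n+1)).map (fun v => [v])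
  else extendA k (coprime_adj n) [] (PySem.List.pyRange 1 (n+1))

-- ===== PORT B =====
def combosB : List Int → Nat → List (List Int)
  | _, 0 => [[]]
  | xs, r + 1 =>
    if xs.length < r + 1 then []
    else
      match xs with
      | [] => []
      | x :: rest => (combosB rest r).map (fun c => x :: c) ++ combosB rest (r + 1)

def pairwiseCoprimeB : List Int → Bool
  | [] => true
  | x :: xs => xs.all (fun w => Int.gcd x w == 1) && pairwiseCoprimeB xs

def coprime_cliques_alt (n : Int) (k : Int) : List (List Int) :=
  if k < 1 then []
  else (combosB (PySem.List.pyRange 1 (n+1)) k.toNat).filter pairwiseCoprimeB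

-- ===== PRECONDITION & SPEC =====
def Spec_coprime_cliques (n : Int) (k : Int) (out : List (List Int)) : Prop := out = coprime_cliques_alt n k
instance (n : Int) (k : Int) (out : List (List Int)) : Decidable (Spec_coprime_cliques n k out) := by unfold Spec_coprime_cliques; infer_instance

-- ===== CLAIM (what is proved, stated in full; the proofs are below) =====
def Claim_equal_coprime_cliques : Prop := ∀ (n : Int) (k : Int), Dom_coprime_cliques n k → Spec_coprime_cliques n k (coprime_cliques n k)

-- ===== LEMMAS AND PROOFS =====

-- the dict comprehension: every key starts at the empty set
lemma getD_init (l : List Int) (d : PySem.Dict Int (PySem.Set Int))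
    (h : ∀ i, d.getD i PySem.Set.empty = PySem.Set.empty) (i : Int) :
    ((l.foldl (fun d v => d.insert v PySem.Set.empty) d).getD i PySem.Set.empty)
      = PySem.Set.empty := by
  induction l generalizing d with
  | nil => exact h i
  | cons v rest ih =>
    simp only [List.foldl_cons]
    refine ih _ (fun j => ?_)
    rw [PySem.Dict.getD_insert]
    split <;> simp_all [PySem.Set.empty]

-- one pass of the inner j-loop of coprime_adj
lemma inner_fold_mem (i : Int) (M : List Int) (d : PySem.Dict Int (PySem.Set Int)) (a b : Int) :
    b ∈ (M.foldl (fun d j =>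
        if Int.gcd i j = 1 then
          (d.modify i PySem.Set.empty (fun s => PySem.Set.add s j)).modify j PySem.Set.empty
            (fun s => PySem.Set.add s i)
        else d) d).getD a PySem.Set.empty ↔
      b ∈ d.getD a PySem.Set.empty ∨
        ∃ j ∈ M, Int.gcd i j = 1 ∧ ((a = i ∧ b = j) ∨ (a = j ∧ b = i)) := by
  induction M generalizing d with
  | nil => simp
  | cons j0 rest ih =>
    simp only [List.foldl_cons]
    rw [ih]
    have hd' : ∀ a b : Int,
        b ∈ ((if Int.gcd i j0 = 1 then
          (d.modify i PySem.Set.empty (fun s => PySem.Set.add s j0)).modify j0 PySem.Set.empty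
            (fun s => PySem.Set.add s i)
        else d)).getD a PySem.Set.empty ↔
        b ∈ d.getD a PySem.Set.empty ∨
          (Int.gcd i j0 = 1 ∧ ((a = i ∧ b = j0) ∨ (a = j0 ∧ b = i))) := by
      intro a b
      by_cases hg : Int.gcd i j0 = 1
      · rw [if_pos hg]
        rw [PySem.Dict.getD_modify]
        by_cases h1 : a = j0
        · rw [if_pos h1, PySem.Set.mem_add, PySem.Dict.getD_modify]
          by_cases h2 : j0 = i
          · rw [if_pos h2, PySem.Set.mem_add]
            subst h1; subst h2
            tauto
          · rw [if_neg h2]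
            subst h1
            tauto
        · rw [if_neg h1, PySem.Dict.getD_modify]
          by_cases h2 : a = i
          · rw [if_pos h2, PySem.Set.mem_add]
            subst h2
            tauto
          · rw [if_neg h2]
            tauto
      · rw [if_neg hg]; tauto
    constructor
    · rintro (hb | ⟨j, hj, hgj, hc⟩)
      · rcases (hd' a b).1 hb with h | ⟨hg, hc⟩
        · exact Or.inl h
        · exact Or.inr ⟨j0, by simp, hg, hc⟩
      · exact Or.inr ⟨j, by simp [hj], hgj, hc⟩
    · rintro (hb | ⟨j, hj, hgj, hc⟩)
      · exact Or.inl ((hd' a b).2 (Or.inl hb))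
      · rcases List.mem_cons.1 hj with rfl | hj
        · exact Or.inl ((hd' a b).2 (Or.inr ⟨hgj, hc⟩))
        · exact Or.inr ⟨j, hj, hgj, hc⟩

lemma outer_fold_mem (n : Int) (L : List Int) (d : PySem.Dict Int (PySem.Set Int)) (a b : Int) :
    b ∈ (L.foldl (fun d i =>
        (PySem.List.pyRange (i+1) (n+1)).foldl (fun d j =>
          if Int.gcd i j = 1 then
            (d.modify i PySem.Set.empty (fun s => PySem.Set.add s j)).modify j PySem.Set.empty
              (fun s => PySem.Set.add s i)
          else d) d) d).getD a PySem.Set.empty ↔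
      b ∈ d.getD a PySem.Set.empty ∨
        ∃ i ∈ L, ∃ j ∈ PySem.List.pyRange (i+1) (n+1),
          Int.gcd i j = 1 ∧ ((a = i ∧ b = j) ∨ (a = j ∧ b = i)) := by
  induction L generalizing d with
  | nil => simp
  | cons i0 rest ih =>
    simp only [List.foldl_cons]
    rw [ih, inner_fold_mem]
    constructor
    · rintro ((hb | ⟨j, hj, hgj, hc⟩) | ⟨i, hi, j, hj, hgj, hc⟩)
      · exact Or.inl hb
      · exact Or.inr ⟨i0, by simp, j, hj, hgj, hc⟩
      · exact Or.inr ⟨i, by simp [hi], j, hj, hgj, hc⟩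
    · rintro (hb | ⟨i, hi, j, hj, hgj, hc⟩)
      · exact Or.inl (Or.inl hb)
      · rcases List.mem_cons.1 hi with rfl | hi
        · exact Or.inl (Or.inr ⟨j, hj, hgj, hc⟩)
        · exact Or.inr ⟨i, hi, j, hj, hgj, hc⟩

-- the adjacency dict, characterised: b ∈ adj[a] ↔ both in [1,n], distinct, coprime
lemma adj_mem (n a b : Int) :
    b ∈ (coprime_adj n).getD a PySem.Set.empty ↔
      (1 ≤ a ∧ a ≤ n ∧ 1 ≤ b ∧ b ≤ n ∧ a ≠ b ∧ Int.gcd a b = 1) := by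
  unfold coprime_adj
  rw [outer_fold_mem, getD_init _ _ (fun i => by simp [PySem.Dict.getD_empty])]
  simp only [PySem.Set.empty, List.not_mem_nil, false_or, PySem.List.mem_pyRange_one]
  constructor
  · rintro ⟨i, hi, j, hj, hg, (⟨rfl, rfl⟩ | ⟨rfl, rfl⟩)⟩
    · exact ⟨by omega, by omega, by omega, by omega, by omega, hg⟩
    · exact ⟨by omega, by omega, by omega, by omega, by omega, by rw [Int.gcd_comm]; exact hg⟩
  · rintro ⟨ha1, ha2, hb1, hb2, hne, hg⟩
    rcases lt_or_gt_of_ne hne with h | h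
    · exact ⟨a, by omega, b, by omega, hg, Or.inl ⟨rfl, rfl⟩⟩
    · exact ⟨b, by omega, a, by omega, by rw [Int.gcd_comm]; exact hg, Or.inr ⟨rfl, rfl⟩⟩

lemma combosB_nil_of_lt (xs : List Int) (r : Nat) (h : xs.length < r) : combosB xs r = [] := by
  cases r with
  | zero => omega
  | succ r => rw [combosB.eq_def]; simp [h]

lemma combosB_nil_succ (r : Nat) : combosB [] (r + 1) = [] := by
  rw [combosB.eq_def]; simp

lemma combosB_cons (x : Int) (rest : List Int) (r : Nat) :
    combosB (x :: rest) (r + 1) = (combosB rest r).map (fun c => x :: c) ++ combosB rest (r + 1) := by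
  by_cases h : (x :: rest).length < r + 1
  · rw [combosB_nil_of_lt _ _ h]
    cases r with
    | zero => simp at h
    | succ r =>
      rw [combosB_nil_of_lt rest (r+1) (by simp at h ⊢; omega),
        combosB_nil_of_lt rest (r+2) (by simp at h ⊢; omega)]
      simp
  · conv_lhs => rw [combosB.eq_def]
    simp only [if_neg h]

-- combinations of a filtered list = combinations whose members all pass the filter
lemma combosB_filter_all (p : Int → Bool) (xs : List Int) (r : Nat) :
    (combosB xs r).filter (fun c => c.all p) = combosB (xs.filter p) r := by
  induction xs generalizing r with
  | nil =>
    cases r with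
    | zero => simp [combosB.eq_def]
    | succ r => simp [combosB_nil_succ]
  | cons x rest ih =>
    cases r with
    | zero => simp [combosB]
    | succ r =>
      rw [combosB_cons, List.filter_append, List.filter_map]
      have hcomp : ((fun c : List Int => c.all p) ∘ (fun c => x :: c))
          = (fun c : List Int => p x && c.all p) := by
        funext c; simp
      rw [hcomp]
      by_cases hp : p x
      · simp only [hp, Bool.true_and]
        rw [ih r, ih (r+1),
          show List.filter p (x :: rest) = x :: List.filter p rest from by simp [hp],
          combosB_cons]
      · simp only [hp, Bool.false_and]
        rw [ih (r+1)]
        simp [hp]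

lemma combosB_one (xs : List Int) : combosB xs 1 = xs.map (fun x => [x]) := by
  induction xs with
  | nil => rfl
  | cons x rest ih =>
    rw [combosB_cons, ih, show combosB rest 0 = [[]] from by rw [combosB.eq_def]]
    simp

-- the main correspondence: A's pruned DFS from (current, cands) = B's filtered combinations
lemma extendA_nil (n k : Int) (current : List Int) (hlen : (current.length : Int) ≤ k) :
    extendA k (coprime_adj n) current []
      = ((combosB [] (k - current.length).toNat).filter pairwiseCoprimeB).map
          (fun c => current ++ c) := by
  by_cases hk : (current.length : Int) = k
  · have hm : (k - (current.length : Int)).toNat = 0 := by omega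
    rw [extendA, if_pos hk, hm]
    simp [combosB.eq_def, pairwiseCoprimeB]
  · obtain ⟨m, hm⟩ : ∃ m, (k - (current.length : Int)).toNat = m + 1 :=
      ⟨(k - (current.length : Int)).toNat - 1, by omega⟩
    rw [extendA, if_neg hk, goA, hm, combosB_nil_succ]
    simp

lemma extendA_eq (n k : Int) : ∀ (N : Nat) (cands : List Int), cands.length ≤ N →
    ∀ (current : List Int),
    (∀ v ∈ cands, 1 ≤ v ∧ v ≤ n) →
    (∀ v ∈ cands, ∀ u ∈ current,
      PySem.Set.contains ((coprime_adj n).getD u PySem.Set.empty) v = true) →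
    cands.Nodup →
    (current.length : Int) ≤ k →
    extendA k (coprime_adj n) current cands
      = ((combosB cands (k - current.length).toNat).filter pairwiseCoprimeB).map
          (fun c => current ++ c) := by
  intro N
  induction N with
  | zero =>
    intro cands hN current hsub hadj hnd hlen
    obtain rfl : cands = [] := List.eq_nil_of_length_eq_zero (by omega)
    exact extendA_nil n k current hlen
  | succ N ihN =>
    intro cands hN current hsub hadj hnd hlen
    cases cands with
    | nil => exact extendA_nil n k current hlen
    | cons v rest =>
      by_cases hk : (current.length : Int) = k
      · have hm : (k - (current.length : Int)).toNat = 0 := by omega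
        rw [extendA, if_pos hk, hm]
        simp [combosB.eq_def, pairwiseCoprimeB]
      · have hlt : (current.length : Int) < k := lt_of_le_of_ne hlen hk
        rw [extendA, if_neg hk, goA]
        by_cases hbr : ((rest.length : Int) + 1) < k - (current.length : Int)
        · rw [if_pos hbr, combosB_nil_of_lt _ _ (by simp; omega)]
          simp
        · rw [if_neg hbr]
          have hall : (current.all fun u =>
              PySem.Set.contains ((coprime_adj n).getD u PySem.Set.empty) v) = true := by
            rw [List.all_eq_true]
            intro u hu
            exact hadj v (by simp) u hu
          rw [hall, if_pos rfl]
          set p : Int → Bool := fun w => Int.gcd v w == 1 with hp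
          have hq : rest.filter
                (fun w => PySem.Set.contains ((coprime_adj n).getD v PySem.Set.empty) w)
              = rest.filter p := by
            apply List.filter_congr
            intro w hw
            have h1 := hsub v (by simp)
            have h2 := hsub w (by simp [hw])
            have hvw : v ≠ w := by
              rintro rfl
              exact (List.nodup_cons.1 hnd).1 hw
            apply Bool.coe_iff_coe.mp
            rw [PySem.Set.contains_iff, adj_mem, hp]
            simp only [beq_iff_eq]
            constructor
            · rintro ⟨-, -, -, -, -, hg⟩; exact hg
            · intro hg; exact ⟨h1.1, h1.2, h2.1, h2.2, hvw, hg⟩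
          set nc := rest.filter
            (fun w => PySem.Set.contains ((coprime_adj n).getD v PySem.Set.empty) w) with hnc
          have hIH1 : extendA k (coprime_adj n) (current ++ [v]) nc
              = ((combosB nc (k - ((current ++ [v]).length : Int)).toNat).filter
                  pairwiseCoprimeB).map (fun c => (current ++ [v]) ++ c) := by
            apply ihN
            · calc nc.length ≤ rest.length := by rw [hnc]; exact List.length_filter_le _ _
                _ ≤ N := by simpa using hN
            · intro w hw
              exact hsub w (by rw [hnc] at hw; simp [List.mem_filter.1 hw |>.1])
            · intro w hw u hu
              rcases List.mem_append.1 hu with hu | hu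
              · exact hadj w (by rw [hnc] at hw; simp [List.mem_filter.1 hw |>.1]) u hu
              · have : u = v := by simpa using hu
                subst this
                rw [hnc] at hw
                exact (List.mem_filter.1 hw).2
            · rw [hnc]
              exact ((List.nodup_cons.1 hnd).2).filter _
            · simp
              omega
          have hgo : goA k (coprime_adj n) current rest = extendA k (coprime_adj n) current rest := by
            rw [extendA, if_neg hk]
          have hIH2 : extendA k (coprime_adj n) current rest
              = ((combosB rest (k - (current.length : Int)).toNat).filter pairwiseCoprimeB).map
                  (fun c => current ++ c) := by
            apply ihN
            · simpa using Nat.le_of_succ_le_succ (by simpa using hN)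
            · intro w hw; exact hsub w (by simp [hw])
            · intro w hw u hu; exact hadj w (by simp [hw]) u hu
            · exact (List.nodup_cons.1 hnd).2
            · exact hlen
          obtain ⟨m, hm⟩ : ∃ m, (k - (current.length : Int)).toNat = m + 1 :=
            ⟨(k - (current.length : Int)).toNat - 1, by omega⟩
          have hm' : (k - (((current ++ [v]).length : Nat) : Int)).toNat = m := by
            simp
            omega
          rw [hgo, hIH2, hIH1, hm, hm']
          rw [combosB_cons, List.filter_append, List.map_append]
          congr 1
          rw [List.filter_map]
          have hcomp : ((fun c => pairwiseCoprimeB c) ∘ (fun c : List Int => v :: c))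
              = fun c : List Int => pairwiseCoprimeB c && c.all p := by
            funext c
            simp only [Function.comp_apply, pairwiseCoprimeB, hp]
            rw [Bool.and_comm]
          rw [hcomp, ← List.filter_filter, combosB_filter_all, ← hq, List.map_map]
          congr 1
          funext c
          simp

-- ===== VERDICT (by name: the statement is the Claim_ definition above) =====
theorem coprime_cliques_spec : Claim_equal_coprime_cliques := by
  unfold Claim_equal_coprime_cliques
  intro n k _
  unfold Spec_coprime_cliques coprime_cliques coprime_cliques_alt
  by_cases h1 : k < 1
  · simp [h1]
  · rw [if_neg h1, if_neg h1]
    by_cases h2 : k = 1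
    · subst h2
      rw [if_pos rfl, show (1 : Int).toNat = 1 from rfl, combosB_one, List.filter_map]
      have ht : ((fun c => pairwiseCoprimeB c) ∘ fun x : Int => [x]) = fun _ => true := by
        funext x
        simp [pairwiseCoprimeB]
      rw [ht]
      simp
    · rw [if_neg h2]
      have h := extendA_eq n k (PySem.List.pyRange 1 (n+1)).length (PySem.List.pyRange 1 (n+1))
        le_rfl []
        (by intro v hv; rw [PySem.List.mem_pyRange_one] at hv; omega)
        (by intro v _ u hu; simp at hu)
        (PySem.List.nodup_pyRange_one 1 (n+1))
        (by simp; omega)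
      simpa using h
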